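-- pv_equiv track=rewrite | github.com/AhmedMAfana/openclaw | src/openclow/worker/tasks/bootstrap.py | _parse_docker_error
-- ===== SOURCE A (Python) =====
-- def _parse_docker_error(output: str) -> str:
--     """Extract the most relevant error from docker compose output."""
--     if not output:
--         return "compose failed (no output)"
--     # Return last meaningful line — Docker puts the error at the end
--     lines = [l.strip() for l in output.strip().split("\n") if l.strip()]
--     # Filter out pure progress lines
--     meaningful = [l for l in lines if not l.startswith("=>") and not l.startswith("#")]
--     if meaningful:
--         return meaningful[-1][:200]
--     return lines[-1][:200] if lines else "compose failed"
-- ===== SOURCE B (Python) =====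
-- def _parse_docker_error(output: str) -> str:
--     """Extract the most relevant error from docker compose output."""
--     if not output:
--         return "compose failed (no output)"
--     fallback = None
--     for raw in reversed(output.strip().split("\n")):
--         line = raw.strip()
--         if not line:
--             continue
--         if not line.startswith("=>") and not line.startswith("#"):
--             return line[:200]
--         if fallback is None:
--             fallback = line
--     return fallback[:200] if fallback is not None else "compose failed"
-- ===== Notes on version B (the rewrite author's own statement) =====
-- stated objective: alternative
-- what changed: A builds two full list comprehensions (stripped non-empty lines, then the meaningful subset) and indexes their last elements; B makes a single short-circuiting backward pass over the split lines, returning the first meaningful line and remembering the first non-empty one as fallback.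
import Mathlib
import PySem

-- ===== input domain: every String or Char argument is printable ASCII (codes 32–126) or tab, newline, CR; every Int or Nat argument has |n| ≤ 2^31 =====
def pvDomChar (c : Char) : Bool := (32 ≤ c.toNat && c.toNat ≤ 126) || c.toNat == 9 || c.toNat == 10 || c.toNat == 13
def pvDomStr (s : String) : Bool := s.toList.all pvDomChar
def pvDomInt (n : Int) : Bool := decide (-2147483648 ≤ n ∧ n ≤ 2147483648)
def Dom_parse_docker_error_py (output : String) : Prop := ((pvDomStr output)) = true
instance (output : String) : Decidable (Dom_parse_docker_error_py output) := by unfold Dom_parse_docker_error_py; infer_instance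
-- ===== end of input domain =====

-- B replaces A's two list comprehensions with one short-circuiting backward pass (objective: alternative decomposition).

-- ===== PORT A =====
def parse_docker_error_py (output : String) : String :=
  if output = "" then "compose failed (no output)"
  else
    let lines := (((PySem.Str.split? (PySem.Str.strip output) "\n").getD []).filter
        (fun l => PySem.Str.strip l ≠ "")).map PySem.Str.strip
    let meaningful := lines.filter
        (fun l => !(PySem.Str.startswith l "=>") && !(PySem.Str.startswith l "#"))
    match meaningful.getLast? with
    | some m => PySem.Str.slice m none (some 200)
    | none =>
      match lines.getLast? with
      | some l => PySem.Str.slice l none (some 200)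
      | none => "compose failed"

-- ===== PORT B =====
-- reverse scan: return the first meaningful line; remember the first non-empty line as fallback
def pdeGo : List String → Option String → String
  | [], some fb => PySem.Str.slice fb none (some 200)
  | [], none => "compose failed"
  | raw :: rest, fb =>
    let line := PySem.Str.strip raw
    if line = "" then pdeGo rest fb
    else if !(PySem.Str.startswith line "=>") && !(PySem.Str.startswith line "#") then
      PySem.Str.slice line none (some 200)
    else
      pdeGo rest (match fb with | some f => some f | none => some line)

def parse_docker_error_py_alt (output : String) : String :=
  if output = "" then "compose failed (no output)"
  else pdeGo ((PySem.Str.split? (PySem.Str.strip output) "\n").getD []).reverse none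

-- ===== PRECONDITION & SPEC =====
def Spec_parse_docker_error_py (output : String) (out : String) : Prop := out = parse_docker_error_py_alt output
instance (output : String) (out : String) : Decidable (Spec_parse_docker_error_py output out) := by unfold Spec_parse_docker_error_py; infer_instance

-- ===== CLAIM (what is proved, stated in full; the proofs are below) =====
def Claim_equal_parse_docker_error_py : Prop := ∀ (output : String), Dom_parse_docker_error_py output → Spec_parse_docker_error_py output (parse_docker_error_py output)

-- ===== LEMMAS AND PROOFS =====

-- invariant of the reverse scan: fb is the last non-empty (stripped) line of the
-- already-scanned suffix, all of whose non-empty lines failed the meaningfulness test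
theorem pdeGo_spec (ys : List String) (fb : Option String) :
    pdeGo ys fb =
      (let lines := ((ys.reverse.filter (fun l => PySem.Str.strip l ≠ "")).map PySem.Str.strip)
       let meaningful := lines.filter
           (fun l => !(PySem.Str.startswith l "=>") && !(PySem.Str.startswith l "#"))
       match meaningful.getLast? with
       | some m => PySem.Str.slice m none (some 200)
       | none =>
         match fb.or lines.getLast? with
         | some l => PySem.Str.slice l none (some 200)
         | none => "compose failed") := by
  induction ys generalizing fb with
  | nil =>
    cases fb <;> simp [pdeGo]
  | cons raw rest ih =>
    simp only [pdeGo, List.reverse_cons, List.filter_append, List.map_append]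
    by_cases h1 : PySem.Str.strip raw = ""
    · simp [h1, ih]
    · by_cases hA : PySem.Chars.startswith (PySem.Chars.strip raw.toList) ['=', '>'] = false ∧
          PySem.Chars.startswith (PySem.Chars.strip raw.toList) ['#'] = false
      · simp [h1, hA]
      · simp only [ih]
        cases fb <;> simp [h1, hA, Option.or] <;> (try split <;> simp_all)

-- ===== VERDICT (by name: the statement is the Claim_ definition above) =====
theorem parse_docker_error_py_spec : Claim_equal_parse_docker_error_py := by
  intro output _
  unfold Spec_parse_docker_error_py parse_docker_error_py parse_docker_error_py_alt
  by_cases h : output = ""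
  · simp [h]
  · simp only [h, pdeGo_spec, List.reverse_reverse, Option.none_or, if_false]
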